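-- pv_equiv track=rewrite | github.com/ziya-ai/ziya | app/utils/sanitizer_util.py | clean_backtick_sequences
-- ===== SOURCE A (Python) =====
-- def clean_backtick_sequences(text: str) -> str:
--     """
--     Cleans up problematic backtick sequences while preserving content within code blocks.
--     Ensures all code blocks are properly closed.
--
--     Args:
--         text (str): The input text containing potential backtick sequences
--
--     Returns:
--         str: Text with properly closed code blocks and preserved content
--     """
--     lines = text.split('\n')
--     cleaned_lines = []
--     in_code_block = False
--     current_block_type = None
--
--     for line in lines:
--         if not in_code_block:
--             if line.startswith('```'):
--                 # Starting a new block
--                 in_code_block = True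
--                 # Capture the block type (diff, python, etc.)
--                 current_block_type = line[3:].strip() if len(line) > 3 else None
--                 cleaned_lines.append(line)
--             else:
--                 cleaned_lines.append(line)
--         else:
--             # Inside a code block - collect content until closing backticks
--             if line.strip() == '```':
--                 # Only close block if it's a bare ``` without a type specifier
--                 if len(line.strip()) == 3:
--                     in_code_block = False
--                     current_block_type = None
--                     cleaned_lines.append(line)
--                 else:
--                     # This is a nested block marker, preserve it
--                     cleaned_lines.append(line)
--             else:
--                 # Within a code block, preserve content exactly as it appears
--                 cleaned_lines.append(line)
--
--     # If we ended with an open code block, close it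
--     if in_code_block:
--         cleaned_lines.append('```')
--         current_block_type = None
--
--     return '\n'.join(cleaned_lines)
-- ===== SOURCE B (Python) =====
-- def clean_backtick_sequences(text: str) -> str:
--     """Alternating-search formulation: repeatedly locate the next fence opener
--     and then its matching closer; no per-line state flag, no rebuilt line list.
--     The original text is returned verbatim, with a closing fence appended only
--     when the last opener has no closer."""
--     lines = text.split('\n')
--     while True:
--         lines = _drop_through(lines, _is_opener)
--         if lines is None:
--             return text
--         lines = _drop_through(lines, _is_closer)
--         if lines is None:
--             return text + '\n```'
--
--
-- def _is_opener(line):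
--     return line.startswith('```')
--
--
-- def _is_closer(line):
--     return line.strip() == '```'
--
--
-- def _drop_through(lines, pred):
--     """Suffix just after the first line satisfying pred, or None if none does."""
--     for k, line in enumerate(lines):
--         if pred(line):
--             return lines[k + 1:]
--     return None
-- ===== Notes on version B (the rewrite author's own statement) =====
-- stated objective: simpler
-- what changed: B replaces A's per-line state machine (in_code_block flag, block-type bookkeeping, rebuilt cleaned_lines list and rejoin) with an alternating search: one generic _drop_through helper repeatedly finds the next fence opener and then its bare closer, returning the original text verbatim with a closing fence line appended only when the last opener has no closer.
import Mathlib
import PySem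

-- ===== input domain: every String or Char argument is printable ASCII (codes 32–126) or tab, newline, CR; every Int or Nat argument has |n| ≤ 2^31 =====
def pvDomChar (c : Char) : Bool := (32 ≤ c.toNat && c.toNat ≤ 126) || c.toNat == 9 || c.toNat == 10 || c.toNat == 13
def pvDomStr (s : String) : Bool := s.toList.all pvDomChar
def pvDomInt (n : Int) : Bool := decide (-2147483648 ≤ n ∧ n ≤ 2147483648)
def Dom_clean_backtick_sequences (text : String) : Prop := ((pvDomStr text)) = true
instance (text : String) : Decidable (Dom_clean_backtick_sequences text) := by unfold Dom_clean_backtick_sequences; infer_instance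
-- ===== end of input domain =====

-- B replaces A's per-line state machine and rebuilt line list with alternating
-- searches (find next opener, then its closer) over the unmodified text (objective: simpler).


-- ===== PORT A =====
-- A's loop body: state = (cleaned_lines, in_code_block, current_block_type); lines as List Char
def pvStepA (st : List (List Char) × Bool × Option (List Char)) (line : List Char) :
    List (List Char) × Bool × Option (List Char) :=
  let (cleaned, inb, bt) := st
  if !inb then
    if PySem.Chars.startswith line ['`','`','`'] then
      (cleaned ++ [line], true,
        if 3 < line.length then some (PySem.Chars.strip (PySem.Chars.slice line (some 3) none)) else none)
    else (cleaned ++ [line], inb, bt)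
  else
    if PySem.Chars.strip line = ['`','`','`'] then
      if (PySem.Chars.strip line).length = 3 then (cleaned ++ [line], false, none)
      else (cleaned ++ [line], inb, bt)
    else (cleaned ++ [line], inb, bt)

def clean_backtick_sequences (text : String) : String :=
  let lines := PySem.Chars.splitOn text.toList ['\n']
  let st := lines.foldl pvStepA ([], false, none)
  let cleaned := if st.2.1 then st.1 ++ [['`','`','`']] else st.1
  String.ofList (PySem.Chars.join ['\n'] cleaned)

-- ===== PORT B =====
def pvIsOpener (line : List Char) : Bool := PySem.Chars.startswith line ['`','`','`']
def pvIsCloser (line : List Char) : Bool := PySem.Chars.strip line = ['`','`','`']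

-- _drop_through: suffix just after the first line satisfying pred, or none
def pvDropThrough (pred : List Char → Bool) : List (List Char) → Option (List (List Char))
  | [] => none
  | l :: rest => if pred l then some rest else pvDropThrough pred rest

-- port-needed termination fact for the alternating loop below
theorem pvDropThrough_lt (pred : List Char → Bool) :
    ∀ (xs ys : List (List Char)), pvDropThrough pred xs = some ys → ys.length < xs.length := by
  intro xs
  induction xs with
  | nil => intro ys h; simp [pvDropThrough] at h
  | cons l rest ih =>
    intro ys h
    by_cases hp : pred l = true
    · simp [pvDropThrough, hp] at h; subst h; simp
    · simp [pvDropThrough, hp] at h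
      have := ih ys h
      simp; omega

-- B's while True loop: alternate opener-search and closer-search
def pvOpenLoop (lines : List (List Char)) : Bool :=
  match h : pvDropThrough pvIsOpener lines with
  | none => false
  | some rest =>
    match h2 : pvDropThrough pvIsCloser rest with
    | none => true
    | some rest2 => pvOpenLoop rest2
termination_by lines.length
decreasing_by
  have a := pvDropThrough_lt pvIsOpener lines rest h
  have b := pvDropThrough_lt pvIsCloser rest rest2 h2
  omega

def clean_backtick_sequences_alt (text : String) : String :=
  if pvOpenLoop (PySem.Chars.splitOn text.toList ['\n']) then text ++ "\n```" else text

-- ===== PRECONDITION & SPEC =====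
def Spec_clean_backtick_sequences (text : String) (out : String) : Prop := out = clean_backtick_sequences_alt text
instance (text : String) (out : String) : Decidable (Spec_clean_backtick_sequences text out) := by unfold Spec_clean_backtick_sequences; infer_instance

-- ===== CLAIM (what is proved, stated in full; the proofs are below) =====
def Claim_equal_clean_backtick_sequences : Prop := ∀ (text : String), Dom_clean_backtick_sequences text → Spec_clean_backtick_sequences text (clean_backtick_sequences text)

-- ===== LEMMAS AND PROOFS =====
-- proof-only abstraction of A's in_code_block flag
def pvFlag (inb : Bool) (line : List Char) : Bool :=
  if !inb then pvIsOpener line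
  else if PySem.Chars.strip line = ['`','`','`'] then false
  else inb

theorem pv_join_cons (sep x : List Char) (rest : List (List Char)) (h : rest ≠ []) :
    PySem.Chars.join sep (x :: rest) = x ++ sep ++ PySem.Chars.join sep rest := by
  cases rest with
  | nil => exact absurd rfl h
  | cons q r => exact PySem.Chars.join_cons_cons sep x q r

-- merging a separator occurrence into one piece does not change the join
theorem pv_join_merge (sep a b : List Char) (xs tail : List (List Char)) :
    PySem.Chars.join sep (xs ++ a :: b :: tail) = PySem.Chars.join sep (xs ++ (a ++ sep ++ b) :: tail) := by
  induction xs with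
  | nil =>
    cases tail with
    | nil => simp [PySem.Chars.join_cons_cons, PySem.Chars.join_singleton]
    | cons t ts => simp [PySem.Chars.join_cons_cons]
  | cons x xs ih =>
    rw [List.cons_append, List.cons_append,
      pv_join_cons sep x (xs ++ a :: b :: tail) (by simp),
      pv_join_cons sep x (xs ++ (a ++ sep ++ b) :: tail) (by simp), ih]

-- invariant of the splitOn worker: joining its output (plus any tail) recovers the input
theorem pv_jgo (sep : List Char) (tail : List (List Char)) :
    ∀ (fuel : Nat) (l cur : List Char) (acc : List (List Char)),
      PySem.Chars.join sep (PySem.Chars.splitOn.go sep fuel l cur acc ++ tail) =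
      PySem.Chars.join sep (acc.reverse ++ (cur.reverse ++ l) :: tail) := by
  intro fuel
  induction fuel with
  | zero =>
    intro l cur acc
    simp [PySem.Chars.splitOn.go, List.append_assoc]
  | succ fuel ih =>
    intro l cur acc
    cases l with
    | nil => simp [PySem.Chars.splitOn.go, List.append_assoc]
    | cons c rest =>
      rw [PySem.Chars.splitOn.go]
      by_cases hp : sep.isPrefixOf (c :: rest) = true
      · rw [if_pos hp, ih]
        obtain ⟨t, ht⟩ := List.isPrefixOf_iff_prefix.mp hp
        have hd : (c :: rest).drop sep.length = t := by rw [← ht]; exact List.drop_left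
        rw [hd]
        have := pv_join_merge sep cur.reverse t acc.reverse tail
        simpa [List.append_assoc, ← ht] using this
      · rw [if_neg hp, ih]
        simp [List.append_assoc]

theorem pv_join_splitOn (sep cs : List Char) (tail : List (List Char)) :
    PySem.Chars.join sep (PySem.Chars.splitOn cs sep ++ tail) =
    PySem.Chars.join sep (cs :: tail) := by
  unfold PySem.Chars.splitOn
  simpa using pv_jgo sep tail (cs.length + 1) cs [] []

-- A's step appends the line unchanged and toggles the flag exactly as pvFlag does
theorem pv_stepA_eq (cleaned : List (List Char)) (inb : Bool) (bt : Option (List Char)) (line : List Char) :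
    (pvStepA (cleaned, inb, bt) line).1 = cleaned ++ [line] ∧
    (pvStepA (cleaned, inb, bt) line).2.1 = pvFlag inb line := by
  unfold pvStepA pvFlag pvIsOpener
  cases inb <;> split_ifs <;> simp_all

theorem pv_fold (lines : List (List Char)) :
    ∀ (cleaned : List (List Char)) (inb : Bool) (bt : Option (List Char)),
      (lines.foldl pvStepA (cleaned, inb, bt)).1 = cleaned ++ lines ∧
      (lines.foldl pvStepA (cleaned, inb, bt)).2.1 = lines.foldl pvFlag inb := by
  induction lines with
  | nil => intro cleaned inb bt; simp [List.foldl]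
  | cons line rest ih =>
    intro cleaned inb bt
    simp only [List.foldl_cons]
    obtain ⟨h1, h2⟩ := pv_stepA_eq cleaned inb bt line
    obtain ⟨c', f', b', he⟩ : ∃ c' f' b', pvStepA (cleaned, inb, bt) line = (c', f', b') :=
      ⟨_, _, _, rfl⟩
    rw [he] at h1 h2 ⊢
    simp only [] at h1 h2
    obtain ⟨g1, g2⟩ := ih c' f' b'
    rw [g1, g2, h1, h2]
    simp

-- folding the flag from False searches for the first opener
theorem pv_fold_false (xs : List (List Char)) :
    xs.foldl pvFlag false =
      match pvDropThrough pvIsOpener xs with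
      | none => false
      | some r => r.foldl pvFlag true := by
  induction xs with
  | nil => simp [pvDropThrough]
  | cons l rest ih =>
    by_cases hp : pvIsOpener l = true
    · simp [List.foldl_cons, pvFlag, hp, pvDropThrough]
    · simp only [List.foldl_cons, pvDropThrough, hp]
      have : pvFlag false l = false := by simp [pvFlag, hp]
      rw [this, ih]
      simp

-- folding the flag from True searches for the first bare closer
theorem pv_fold_true (xs : List (List Char)) :
    xs.foldl pvFlag true =
      match pvDropThrough pvIsCloser xs with
      | none => true
      | some r => r.foldl pvFlag false := by
  induction xs with
  | nil => simp [pvDropThrough]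
  | cons l rest ih =>
    by_cases hc : PySem.Chars.strip l = ['`','`','`']
    · have : pvIsCloser l = true := by simp [pvIsCloser, hc]
      simp [List.foldl_cons, pvFlag, hc, pvDropThrough, this]
    · have hb : pvIsCloser l = false := by simp [pvIsCloser, hc]
      simp only [List.foldl_cons, pvDropThrough, hb]
      have : pvFlag true l = true := by simp [pvFlag, hc]
      rw [this, ih]
      simp

-- A's final flag equals B's alternating-search result
theorem pv_flag_eq : ∀ (n : Nat) (xs : List (List Char)), xs.length ≤ n →
    xs.foldl pvFlag false = pvOpenLoop xs := by
  intro n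
  induction n with
  | zero =>
    intro xs h
    have : xs = [] := List.eq_nil_of_length_eq_zero (by omega)
    subst this
    simp [pvOpenLoop, pvDropThrough]
  | succ n ih =>
    intro xs h
    rw [pv_fold_false, pvOpenLoop]
    cases ho : pvDropThrough pvIsOpener xs with
    | none => rfl
    | some r =>
      simp only []
      rw [pv_fold_true]
      cases hc : pvDropThrough pvIsCloser r with
      | none => rfl
      | some r2 =>
        have a := pvDropThrough_lt pvIsOpener xs r ho
        have b := pvDropThrough_lt pvIsCloser r r2 hc
        exact ih r2 (by omega)

-- ===== VERDICT (by name: the statement is the Claim_ definition above) =====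
theorem clean_backtick_sequences_spec : Claim_equal_clean_backtick_sequences := by
  intro text _
  unfold Spec_clean_backtick_sequences clean_backtick_sequences clean_backtick_sequences_alt
  simp only []
  obtain ⟨h1, h2⟩ := pv_fold (PySem.Chars.splitOn text.toList ['\n']) [] false none
  rw [h1, h2, List.nil_append]
  rw [pv_flag_eq (PySem.Chars.splitOn text.toList ['\n']).length _ le_rfl]
  by_cases hf : pvOpenLoop (PySem.Chars.splitOn text.toList ['\n']) = true
  · rw [hf]
    simp only [if_true]
    rw [pv_join_splitOn, PySem.Chars.join_cons_cons, PySem.Chars.join_singleton]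
    have : text ++ "\n```" = String.ofList (text.toList ++ ['\n','`','`','`']) := by simp
    rw [this]
    simp [List.append_assoc]
  · rw [Bool.not_eq_true] at hf
    rw [hf]
    simp only [if_false, Bool.false_eq_true]
    have := pv_join_splitOn ['\n'] text.toList []
    rw [List.append_nil] at this
    rw [this, PySem.Chars.join_singleton, String.ofList_toList]
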